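-- pv_equiv track=rewrite | github.com/mrzwk-b/AoC_23 | day_9_mirage_maintenance/main.py | whatComesFirst
-- ===== SOURCE A (Python) =====
-- def whatComesFirst(sequence):
--     allZeros = False
--     allSequences = [sequence]
--     row = 0
--     while not allZeros:
--         allZeros = True
--         newSequence = []
--         for i in range(len(allSequences[row]) - 1):
--             newValue = allSequences[row][i+1] - allSequences[row][i]
--             allZeros &= newValue == 0
--             newSequence.append(newValue)
--         allSequences.append(newSequence)
--         row += 1
--     total = 0
--     for i in range(len(allSequences)):
--         total += (allSequences[i][0] if len(allSequences[i]) > 0 else 0) * (1 if i % 2 == 0 else -1)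
--     return total
-- ===== SOURCE B (Python) =====
-- def whatComesFirst(sequence):
--     total, sign, cur = 0, 1, sequence
--     while cur:
--         total += sign * cur[0]
--         sign = -sign
--         cur = [b - a for a, b in zip(cur, cur[1:])]
--     return total
-- ===== Notes on version B (the rewrite author's own statement) =====
-- stated objective: simpler
-- what changed: B replaces A's stored difference table, all-zeros early-stop flag and separate sign-alternating summation pass by a single sign-flipping loop that accumulates the total while it walks down successive difference rows until a row is empty.
import Mathlib
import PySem

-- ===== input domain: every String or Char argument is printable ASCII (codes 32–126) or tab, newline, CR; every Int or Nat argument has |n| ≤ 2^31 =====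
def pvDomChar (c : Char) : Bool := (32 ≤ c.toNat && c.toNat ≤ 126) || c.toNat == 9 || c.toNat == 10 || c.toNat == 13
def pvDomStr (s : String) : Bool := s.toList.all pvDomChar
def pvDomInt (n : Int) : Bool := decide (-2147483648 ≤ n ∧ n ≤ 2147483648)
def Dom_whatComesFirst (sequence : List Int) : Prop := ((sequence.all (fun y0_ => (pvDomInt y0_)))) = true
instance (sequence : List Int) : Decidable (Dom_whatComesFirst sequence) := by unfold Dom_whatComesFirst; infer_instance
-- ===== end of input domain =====

-- B replaces A's difference table, all-zeros early-stop flag and separate sign-alternating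
-- summation pass by one sign-flipping loop over successive difference rows (objective: simpler).

-- ===== PORT A =====
-- inner for-loop of A: builds the difference row (same values, same order) while
-- accumulating the allZeros flag (Bool conjunction; associativity makes the fold order irrelevant)
def diffLoop : List Int → Bool × List Int
  | x :: y :: rest =>
      let v := y - x
      let r := diffLoop (y :: rest)
      ((v == 0) && r.1, v :: r.2)
  | _ => (true, [])

-- cited by loopA's decreasing_by
theorem diffLoop_snd_length (xs : List Int) : (diffLoop xs).2.length = xs.length - 1 := by
  induction xs with
  | nil => simp [diffLoop]
  | cons x t ih =>
    cases t with
    | nil => simp [diffLoop]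
    | cons y rest => simp [diffLoop] at ih ⊢; omega

-- cited by loopA's decreasing_by
theorem diffLoop_fst_false (xs : List Int) (h : (diffLoop xs).1 = false) : 2 ≤ xs.length := by
  match xs with
  | [] => simp [diffLoop] at h
  | [x] => simp [diffLoop] at h
  | x :: y :: rest => simp

-- A's while-loop: state = list of rows built so far (allSequences); allSequences[row] is the
-- last row appended, kept as `cur`
def loopA (cur : List Int) (acc : List (List Int)) : List (List Int) :=
  let r := diffLoop cur
  let acc' := acc ++ [r.2]
  if r.1 then acc' else loopA r.2 acc'
termination_by cur.length
decreasing_by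
  rename_i hr
  have h1 := diffLoop_snd_length cur
  have h2 := diffLoop_fst_false cur (by simpa using hr)
  omega

-- A's final for-loop: state = (running index i, running total)
def totalLoop : List (List Int) → Int → Int → Int
  | [], _, t => t
  | r :: rs, i, t =>
      totalLoop rs (i + 1)
        (t + (match r with | [] => 0 | a :: _ => a) * (if i % 2 == 0 then 1 else -1))

def whatComesFirst (sequence : List Int) : Int :=
  totalLoop (loopA sequence [sequence]) 0 0

-- ===== PORT B =====
-- [b - a for a, b in zip(cur, cur[1:])]  (cur[1:] = cur.drop 1; exact for lists)
def diffB (cur : List Int) : List Int := ((cur.zip (cur.drop 1)).map fun p => p.2 - p.1)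

-- cited by loopB's decreasing_by
theorem diffB_length (a : Int) (rest : List Int) : (diffB (a :: rest)).length = rest.length := by
  simp [diffB]

-- B's while-loop: state = (total, sign, cur)
def loopB (total sign : Int) (cur : List Int) : Int :=
  match cur with
  | [] => total
  | a :: rest => loopB (total + sign * a) (-sign) (diffB (a :: rest))
termination_by cur.length
decreasing_by simp [diffB_length]

def whatComesFirst_alt (sequence : List Int) : Int := loopB 0 1 sequence

-- ===== PRECONDITION & SPEC =====
def Spec_whatComesFirst (sequence : List Int) (out : Int) : Prop := out = whatComesFirst_alt sequence
instance (sequence : List Int) (out : Int) : Decidable (Spec_whatComesFirst sequence out) := by unfold Spec_whatComesFirst; infer_instance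

-- ===== CLAIM (what is proved, stated in full; the proofs are below) =====
def Claim_equal_whatComesFirst : Prop := ∀ (sequence : List Int), Dom_whatComesFirst sequence → Spec_whatComesFirst sequence (whatComesFirst sequence)

-- ===== LEMMAS AND PROOFS =====

-- alternating sum of the first elements (0 for an empty row) of a list of rows
def altT : List (List Int) → Int
  | [] => 0
  | r :: rs => (match r with | [] => 0 | a :: _ => a) - altT rs

-- the value B's loop computes, as a recursion (ghost)
def altR : List Int → Int
  | [] => 0
  | a :: rest => a - altR (diffB (a :: rest))
termination_by s => s.length
decreasing_by simp [diffB_length]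

theorem loopB_eq (total sign : Int) (cur : List Int) :
    loopB total sign cur = total + sign * altR cur := by
  fun_induction loopB with
  | case1 t s => simp [altR]
  | case2 t s a rest ih => rw [ih, altR]; ring

theorem diffLoop_eq (xs : List Int) :
    diffLoop xs = ((diffB xs).all (fun v => v == 0), diffB xs) := by
  induction xs with
  | nil => simp [diffLoop, diffB]
  | cons x t ih =>
    cases t with
    | nil => simp [diffLoop, diffB]
    | cons y rest =>
      simp only [diffLoop, ih, diffB, List.drop_succ_cons, List.drop_zero, List.zip_cons_cons,
        List.map_cons, List.all_cons]

theorem altR_zeros (s : List Int) (h : ∀ v ∈ s, v = 0) : altR s = 0 := by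
  fun_induction altR with
  | case1 => rfl
  | case2 a rest ih =>
    have ha : a = 0 := h a (by simp)
    have hd : ∀ v ∈ diffB (a :: rest), v = 0 := by
      intro v hv
      simp only [diffB, List.mem_map] at hv
      obtain ⟨⟨p, q⟩, hpq, hv⟩ := hv
      have hp := List.of_mem_zip hpq
      have h1 := h p hp.1
      have h2 := h q (List.mem_of_mem_drop hp.2)
      omega
    rw [ih hd, ha]; ring

theorem totalLoop_eq (rows : List (List Int)) (i t : Int) :
    totalLoop rows i t = t + (if i % 2 == 0 then (1:Int) else -1) * altT rows := by
  induction rows generalizing i t with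
  | nil => simp [totalLoop, altT]
  | cons r rs ih =>
    simp only [totalLoop, altT]
    rw [ih]
    have h : ((i + 1) % 2 == 0) = !(i % 2 == 0) := by
      rcases Int.emod_two_eq_zero_or_one i with h | h <;> simp [h] <;> omega
    rw [h]
    rcases Bool.eq_false_or_eq_true (i % 2 == 0) with hb | hb <;> simp [hb] <;> ring

theorem loopA_acc_fuel (n : Nat) (cur : List Int) (hn : cur.length ≤ n)
    (acc : List (List Int)) : loopA cur acc = acc ++ loopA cur [] := by
  induction n generalizing cur acc with
  | zero =>
    have : (diffLoop cur).1 = true := by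
      cases cur with
      | nil => simp [diffLoop]
      | cons a t => simp at hn
    rw [loopA]
    conv_rhs => rw [loopA]
    simp [this]
  | succ n ih =>
    rw [loopA]
    conv_rhs => rw [loopA]
    by_cases h : (diffLoop cur).1 = true
    · simp [h]
    · simp only [h, Bool.false_eq_true, if_false, List.nil_append]
      have h2 := diffLoop_fst_false cur (by simpa using h)
      have h1 := diffLoop_snd_length cur
      have hle : (diffLoop cur).2.length ≤ n := by omega
      rw [ih _ hle, ih _ hle (acc := [(diffLoop cur).2])]
      rw [List.append_assoc]

theorem loopA_acc (cur : List Int) (acc : List (List Int)) :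
    loopA cur acc = acc ++ loopA cur [] :=
  loopA_acc_fuel cur.length cur le_rfl acc

theorem head0_zeros (d : List Int) (hz : ∀ v ∈ d, v = 0) :
    (match d with | [] => (0:Int) | a :: _ => a) = 0 := by
  cases d with
  | nil => rfl
  | cons a rest => exact hz a (by simp)

theorem altT_loopA_fuel (n : Nat) (cur : List Int) (hn : cur.length ≤ n) :
    altT (loopA cur []) = altR (diffB cur) := by
  induction n generalizing cur with
  | zero =>
    have hc : cur = [] := by cases cur <;> simp_all
    subst hc
    rw [loopA]
    simp [diffLoop, altT, diffB, altR]
  | succ n ih =>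
    rw [loopA, diffLoop_eq]
    by_cases h : (diffB cur).all (fun v => v == 0) = true
    · simp only [h, if_true, List.nil_append, altT]
      have hz : ∀ v ∈ diffB cur, v = 0 := by
        intro v hv; simpa using List.all_eq_true.mp h v hv
      rw [altR_zeros _ hz, head0_zeros _ hz]
      ring
    · simp only [h, Bool.false_eq_true, if_false]
      have hne : diffB cur ≠ [] := by rintro hd; rw [hd] at h; simp at h
      have h2 : 2 ≤ cur.length := by
        have := diffLoop_fst_false cur (by rw [diffLoop_eq]; simpa using h)
        exact this
      have h1 : (diffB cur).length = cur.length - 1 := by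
        have := diffLoop_snd_length cur; rwa [diffLoop_eq] at this
      rw [loopA_acc]
      simp only [List.nil_append, List.singleton_append, altT]
      rw [ih _ (by omega)]
      cases hd : diffB cur with
      | nil => exact absurd hd hne
      | cons a rest => rw [altR]

theorem altT_loopA (cur : List Int) : altT (loopA cur []) = altR (diffB cur) :=
  altT_loopA_fuel cur.length cur le_rfl

theorem whatComesFirst_eq_altR (s : List Int) : whatComesFirst s = altR s := by
  rw [whatComesFirst, loopA_acc, totalLoop_eq]
  simp only [List.singleton_append, altT, altT_loopA]
  cases s with
  | nil => simp [diffB, altR_zeros]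
  | cons a rest => rw [altR]; norm_num

-- ===== VERDICT (by name: the statement is the Claim_ definition above) =====
theorem whatComesFirst_spec : Claim_equal_whatComesFirst := by
  intro s _
  unfold Spec_whatComesFirst whatComesFirst_alt
  rw [loopB_eq, whatComesFirst_eq_altR]
  ring
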